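-- pv_equiv track=rewrite | github.com/ghaefner/Group07 | Project/GUMShell/phase.py | bandp
-- ===== SOURCE A (Python) =====
-- def sort(N, a):
--
--     c = a[:]
--
--     number = 0
--     p = 0
--
--     for i in range(0, N - 1, 1):
--         for j in range(i + 1, N, 1):
--             if(c[j] < c[i]):
--                 number += 1
--                 p = c[i]
--                 c[i] = c[j]
--                 c[j] = p
--
--     phase = (-1)**number
--
--     return(phase, c)
--
-- def bandp(p, q, r, s, N, a):
--
--     point = 0
--     c = a[:]
--
--     for i in range(0, N - 1, 1):
--         for j in range(i + 1, N, 1):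
--             if r == c[i] and s == c[j]:
--                 point = 1
--                 c[i] = p
--                 c[j] = q
--
--     for i in range(0, N - 1, 1):
--         for j in range(i + 1, N, 1):
--             if c[i] == c[j]:
--                 point = 0
--
--     if point == 0:
--         phase = 0
--         b = c[:]
--     elif point == 1:
--         phase, d = sort(N, c)
--         b = d[:]
--
--     return(phase, b)
-- ===== SOURCE B (Python) =====
-- def bandp(p, q, r, s, N, a):
--     c = list(a)
--     i = next((k for k in range(N) if c[k] == r), None)
--     j = None if i is None else next((k for k in range(i + 1, N) if c[k] == s), None)
--     if j is None:
--         return (0, c)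
--     c[i], c[j] = p, q
--     head, tail = c[:N], c[N:]
--     if len(set(head)) != len(head):
--         return (0, c)
--     inv = sum(1 for x in range(N) for y in range(x + 1, N) if head[x] > head[y])
--     return ((-1) ** inv, sorted(head) + tail)
-- ===== Notes on version B (the rewrite author's own statement) =====
-- stated objective: faster
-- what changed: A's three unconditional O(N^2) index double-loops (pair rescan, duplicate scan, swap-counting bubble sort) are replaced by an O(N) search for the first r and the first following s, a single replacement, an O(N) set-size duplicate test and a library sort with the permutation sign taken from inversion-count parity; B short-circuits to phase 0 without any quadratic pass when no (r,s) pair exists. …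
-- outside the precondition, e.g. on bandp(5, 6, 1, 2, 1, []): A returns (0, []), B raises IndexError; on bandp(1, 6, 1, 2, 3, [1, 2, 2]): A returns (0, [1, 6, 6]), B returns (-1, [1, 2, 6])
import Mathlib
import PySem

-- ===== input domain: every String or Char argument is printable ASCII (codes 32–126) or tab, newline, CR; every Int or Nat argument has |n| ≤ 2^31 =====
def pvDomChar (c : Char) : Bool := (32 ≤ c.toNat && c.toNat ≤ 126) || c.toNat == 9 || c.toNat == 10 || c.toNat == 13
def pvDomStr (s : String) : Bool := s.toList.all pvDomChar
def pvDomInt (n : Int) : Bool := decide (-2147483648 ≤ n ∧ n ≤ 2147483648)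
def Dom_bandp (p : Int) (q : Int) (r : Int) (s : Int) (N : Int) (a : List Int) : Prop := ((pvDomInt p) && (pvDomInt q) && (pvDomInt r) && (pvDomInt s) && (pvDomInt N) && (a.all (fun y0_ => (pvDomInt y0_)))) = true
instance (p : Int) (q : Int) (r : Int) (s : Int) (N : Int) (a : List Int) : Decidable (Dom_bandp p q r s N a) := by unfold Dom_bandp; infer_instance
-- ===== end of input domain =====

-- B replaces A's three unconditional quadratic index-loop passes by a linear search for the
-- first (r, then s) pair, one replacement, a set-size duplicate test and a library sort with
-- the sign taken from inversion-count parity (measured faster in a timing run).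

-- ===== PORT A =====
-- inner body of A's first double loop: if r == c[i] and s == c[j]: point = 1; c[i] = p; c[j] = q
def aStep1 (p q r s : Int) (i : Int) (st : Int × List Int) (j : Int) : Int × List Int :=
  if r = PySem.List.pyGetD st.2 i 0 ∧ s = PySem.List.pyGetD st.2 j 0 then
    (1, PySem.List.pySetD (PySem.List.pySetD st.2 i p) j q)
  else st

-- A's first double loop, state (point, c)
def aLoop1 (p q r s N : Int) (c0 : List Int) : Int × List Int :=
  (PySem.List.pyRange 0 (N - 1)).foldl
    (fun st i => (PySem.List.pyRange (i + 1) N).foldl (aStep1 p q r s i) st) (0, c0)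

-- A's second double loop: if c[i] == c[j]: point = 0
def aLoop2 (N : Int) (c : List Int) (pt : Int) : Int :=
  (PySem.List.pyRange 0 (N - 1)).foldl
    (fun pt i => (PySem.List.pyRange (i + 1) N).foldl
      (fun pt j => if PySem.List.pyGetD c i 0 = PySem.List.pyGetD c j 0 then 0 else pt) pt) pt

-- inner body of sort's double loop: if c[j] < c[i]: number += 1; swap c[i], c[j]
def aSortStep (i : Int) (st : Int × List Int) (j : Int) : Int × List Int :=
  if PySem.List.pyGetD st.2 j 0 < PySem.List.pyGetD st.2 i 0 then
    (st.1 + 1,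
      PySem.List.pySetD (PySem.List.pySetD st.2 i (PySem.List.pyGetD st.2 j 0)) j
        (PySem.List.pyGetD st.2 i 0))
  else st

-- A's helper sort(N, a); number ≥ 0, so (-1)**number is ported as (-1)^number.toNat
def sortA (N : Int) (a : List Int) : Int × List Int :=
  let st := (PySem.List.pyRange 0 (N - 1)).foldl
    (fun st i => (PySem.List.pyRange (i + 1) N).foldl (aSortStep i) st) (0, a)
  ((-1 : Int) ^ st.1.toNat, st.2)

def bandp (p : Int) (q : Int) (r : Int) (s : Int) (N : Int) (a : List Int) : Int × List Int :=
  let st := aLoop1 p q r s N a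
  let point := aLoop2 N st.2 st.1
  if point = 0 then (0, st.2) else sortA N st.2

-- ===== PORT B =====
def bandp_alt (p : Int) (q : Int) (r : Int) (s : Int) (N : Int) (a : List Int) : Int × List Int :=
  -- i = next((k for k in range(N) if c[k] == r), None)
  match (PySem.List.pyRange 0 N).find? (fun k => PySem.List.pyGetD a k 0 == r) with
  | none => (0, a)
  | some i =>
    -- j = next((k for k in range(i + 1, N) if c[k] == s), None)
    match (PySem.List.pyRange (i + 1) N).find? (fun k => PySem.List.pyGetD a k 0 == s) with
    | none => (0, a)
    | some j =>
      let c := PySem.List.pySetD (PySem.List.pySetD a i p) j q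
      let head := PySem.List.slice c none (some N)
      let tail := PySem.List.slice c (some N) none
      if PySem.Set.len (PySem.Set.ofList head) ≠ PySem.List.len head then (0, c)
      else
        let inv := (PySem.List.pyRange 0 N).foldl
          (fun acc x => (PySem.List.pyRange (x + 1) N).foldl
            (fun (acc : Int) y =>
              if PySem.List.pyGetD head x 0 > PySem.List.pyGetD head y 0 then acc + 1 else acc)
            acc) 0
        ((-1 : Int) ^ inv.toNat, PySem.List.sorted head (fun x => x) ++ tail)

-- ===== PRECONDITION & SPEC =====
-- Pre_ excludes (a) N > len(a), where A's c[i]/c[j] indexing raises IndexError (at N=1 with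
-- a=[] it returns (0,[]) only because its loops are empty, while B's index scan raises), and
-- (b) lists whose first N entries contain duplicates, where A's sequence of overlapping
-- in-place pair replacements is accidental (occupation lists are duplicate-free).
def Pre_bandp (p : Int) (q : Int) (r : Int) (s : Int) (N : Int) (a : List Int) : Prop :=
  N ≤ (a.length : Int) ∧ (a.take N.toNat).Nodup
instance (p : Int) (q : Int) (r : Int) (s : Int) (N : Int) (a : List Int) : Decidable (Pre_bandp p q r s N a) := by unfold Pre_bandp; infer_instance

def pvWitness_bandp : Int × Int × Int × Int × Int × List Int := (7, 8, 1, 2, 4, [3, 1, 2, 4])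

def Spec_bandp (p : Int) (q : Int) (r : Int) (s : Int) (N : Int) (a : List Int) (out : Int × List Int) : Prop := out = bandp_alt p q r s N a
instance (p : Int) (q : Int) (r : Int) (s : Int) (N : Int) (a : List Int) (out : Int × List Int) : Decidable (Spec_bandp p q r s N a out) := by unfold Spec_bandp; infer_instance

-- ===== CLAIM (what is proved, stated in full; the proofs are below) =====
def Claim_equal_bandp : Prop := ∀ (p : Int) (q : Int) (r : Int) (s : Int) (N : Int) (a : List Int), Dom_bandp p q r s N a → Pre_bandp p q r s N a → Spec_bandp p q r s N a (bandp p q r s N a)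

-- ===== LEMMAS AND PROOFS =====

def invCount : List Int → Nat
  | [] => 0
  | x :: xs => xs.countP (fun y => y < x) + invCount xs

def cross (L M : List Int) : Nat := (L.map (fun x => M.countP (fun y => y < x))).sum

lemma invCount_append (L M : List Int) :
    invCount (L ++ M) = invCount L + cross L M + invCount M := by
  induction L with
  | nil => simp [invCount, cross]
  | cons x L ih =>
      simp only [List.cons_append, invCount, List.countP_append, ih, cross, List.map_cons,
        List.sum_cons]
      omega

lemma cross_cons_right (Y : List Int) (w : Int) (Z : List Int) :
    cross Y (w :: Z) = Y.countP (fun x => w < x) + cross Y Z := by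
  simp only [cross, List.countP_cons]
  induction Y with
  | nil => simp
  | cons y Y ih =>
      simp only [List.map_cons, List.sum_cons, List.countP_cons, ih]
      by_cases h : w < y <;> simp [h] <;> omega

lemma countP_lt_add_gt (Y : List Int) (v : Int) (hv : v ∉ Y) :
    Y.countP (fun y => y < v) + Y.countP (fun y => v < y) = Y.length := by
  have h := List.length_eq_countP_add_countP (fun y => decide (y < v)) (l := Y)
  have : Y.countP (fun a => decide ¬(decide (a < v)) = true) = Y.countP (fun y => v < y) := by
    apply List.countP_congr
    intro y hy
    have : y ≠ v := fun h => hv (h ▸ hy)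
    simp only [decide_eq_true_eq, decide_not]
    by_cases h1 : y < v <;> simp [h1] <;> omega
  omega

lemma cross_congr_right (X M M' : List Int) (h : M.Perm M') : cross X M = cross X M' := by
  unfold cross
  congr 1
  exact List.map_congr_left fun x _ => h.countP_eq _

lemma cross_perm_left (L L' M : List Int) (h : L.Perm L') : cross L M = cross L' M :=
  (h.map _).sum_eq

lemma swap_parity (X Y Z : List Int) (v w : Int) (hvY : v ∉ Y) (hwY : w ∉ Y) (hvw : w < v) :
    (invCount (X ++ w :: (Y ++ v :: Z)) + invCount (X ++ v :: (Y ++ w :: Z))) % 2 = 1 := by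
  have hperm : (w :: (Y ++ v :: Z)).Perm (v :: (Y ++ w :: Z)) :=
    ((List.perm_middle).cons w).trans ((List.Perm.swap v w _).trans
      (((List.perm_middle).symm).cons v))
  rw [invCount_append, invCount_append, cross_congr_right X _ _ hperm]
  have e1 : ∀ u z : Int, invCount (u :: (Y ++ z :: Z)) =
      Y.countP (fun y => y < u) + (if z < u then 1 else 0) + Z.countP (fun y => y < u)
      + invCount Y + Y.countP (fun x => z < x) + cross Y Z + Z.countP (fun y => y < z)
      + invCount Z := by
    intro u z
    show (Y ++ z :: Z).countP _ + invCount (Y ++ z :: Z) = _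
    rw [invCount_append, cross_cons_right]
    simp only [List.countP_append, List.countP_cons, invCount]
    by_cases hzu : z < u <;> simp [hzu] <;> omega
  rw [e1 w v, e1 v w]
  have h1 := countP_lt_add_gt Y v hvY
  have h2 := countP_lt_add_gt Y w hwY
  have hif1 : (if v < w then (1:Nat) else 0) = 0 := by simp; omega
  have hif2 : (if w < v then (1:Nat) else 0) = 1 := by simp [hvw]
  rw [hif1, hif2]
  omega

lemma set_at_middle {α : Type} (X : List α) (u w : α) (M : List α) :
    (X ++ u :: M).set X.length w = X ++ w :: M := by
  rw [List.set_append]; simp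

lemma getD_at_middle (X : List Int) (u : Int) (M : List Int) :
    (X ++ u :: M).getD X.length 0 = u := by
  rw [List.getD_append_right _ _ _ _ (le_refl _)]; simp

lemma set_append_left' (X M : List Int) (i : Nat) (h : i < X.length) (v : Int) :
    (X ++ M).set i v = X.set i v ++ M := by
  rw [List.set_append]; simp [h]

-- A-side transliteration pieces

lemma walk_noop (p q r s : Int) (i : Nat) :
    ∀ (V U T : List Int) (k : Nat) (pt : Int), U.length = k → i < k →
    U.getD i 0 ≠ r →
    (PySem.List.pyRange (k : Int) ((k + V.length : Nat) : Int)).foldl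
      (aStep1 p q r s (i : Int)) (pt, U ++ (V ++ T)) = (pt, U ++ (V ++ T)) := by
  intro V
  induction V with
  | nil => intro U T k pt hU hik hir; simp [PySem.List.pyRange_one_eq_nil]
  | cons y V ih =>
      intro U T k pt hU hik hir
      have hlt : (k : Int) < ((k + (y :: V).length : Nat) : Int) := by
        simp only [List.length_cons]; push_cast; omega
      rw [PySem.List.pyRange_one_cons hlt, List.foldl_cons]
      have hstep : aStep1 p q r s (i : Int) (pt, U ++ (y :: V ++ T)) (k : Int)
          = (pt, U ++ (y :: V ++ T)) := by
        unfold aStep1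
        rw [if_neg]
        simp only [PySem.List.pyGetD_natCast]
        rw [List.getD_append _ _ _ _ (by omega)]
        tauto
      rw [hstep]
      have hre : (U ++ (y :: V ++ T)) = (U ++ [y]) ++ (V ++ T) := by simp
      have hb : ((k + (y :: V).length : Nat) : Int) = (((k+1) + V.length : Nat) : Int) := by
        simp only [List.length_cons]; push_cast; omega
      have hk1 : (k : Int) + 1 = ((k+1 : Nat) : Int) := by push_cast; omega
      rw [hre, hb, hk1, ih (U ++ [y]) T (k+1) pt (by simp [hU]) (by omega)
        (by rw [List.getD_append _ _ _ _ (by omega)]; exact hir)]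

lemma walk_nos (p q r s : Int) (i : Nat) :
    ∀ (V U T : List Int) (k : Nat) (pt : Int), U.length = k → i < k →
    U.getD i 0 = r → s ∉ V →
    (PySem.List.pyRange (k : Int) ((k + V.length : Nat) : Int)).foldl
      (aStep1 p q r s (i : Int)) (pt, U ++ (V ++ T)) = (pt, U ++ (V ++ T)) := by
  intro V
  induction V with
  | nil => intro U T k pt hU hik hir hs; simp [PySem.List.pyRange_one_eq_nil]
  | cons y V ih =>
      intro U T k pt hU hik hir hs
      have hlt : (k : Int) < ((k + (y :: V).length : Nat) : Int) := by
        simp only [List.length_cons]; push_cast; omega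
      rw [PySem.List.pyRange_one_cons hlt, List.foldl_cons]
      have hstep : aStep1 p q r s (i : Int) (pt, U ++ (y :: V ++ T)) (k : Int)
          = (pt, U ++ (y :: V ++ T)) := by
        unfold aStep1
        rw [if_neg]
        simp only [PySem.List.pyGetD_natCast]
        rw [show (U ++ (y :: V ++ T)).getD k 0 = y by rw [← hU]; exact getD_at_middle U y _]
        have : s ≠ y := fun h => hs (by simp [h])
        tauto
      rw [hstep]
      have hre : (U ++ (y :: V ++ T)) = (U ++ [y]) ++ (V ++ T) := by simp
      have hb : ((k + (y :: V).length : Nat) : Int) = (((k+1) + V.length : Nat) : Int) := by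
        simp only [List.length_cons]; push_cast; omega
      have hk1 : (k : Int) + 1 = ((k+1 : Nat) : Int) := by push_cast; omega
      rw [hre, hb, hk1, ih (U ++ [y]) T (k+1) pt (by simp [hU]) (by omega)
        (by rw [List.getD_append _ _ _ _ (by omega)]; exact hir) (fun h => hs (by simp [h]))]

lemma getD_set_self (U : List Int) (i : Nat) (hi : i < U.length) (p : Int) :
    (U.set i p).getD i 0 = p := by
  rw [List.getD_eq_getElem _ _ (by simpa using hi)]
  simp
lemma walk_find2 (p q r s : Int) (i : Nat) :
    ∀ (V1 U T V2 : List Int) (k : Nat) (pt : Int), U.length = k → i < k →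
    U.getD i 0 = r → s ∉ V1 → s ∉ V2 →
    (PySem.List.pyRange (k : Int) ((k + (V1 ++ s :: V2).length : Nat) : Int)).foldl
      (aStep1 p q r s (i : Int)) (pt, U ++ ((V1 ++ s :: V2) ++ T)) =
      (1, U.set i p ++ (V1 ++ (q :: V2 ++ T))) := by
  intro V1
  induction V1 with
  | nil =>
      intro U T V2 k pt hU hik hir _ hs2
      have hi : i < U.length := by omega
      have hlt : (k : Int) < ((k + ([] ++ s :: V2).length : Nat) : Int) := by
        simp only [List.nil_append, List.length_cons]; push_cast; omega
      rw [PySem.List.pyRange_one_cons hlt, List.foldl_cons]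
      have hstep : aStep1 p q r s (i : Int) (pt, U ++ (([] ++ s :: V2) ++ T)) (k : Int)
          = (1, (U.set i p ++ [q]) ++ (V2 ++ T)) := by
        unfold aStep1
        rw [if_pos]
        · simp only [PySem.List.pySetD_natCast, List.nil_append, List.cons_append]
          congr 1
          rw [set_append_left' _ _ _ hi]
          rw [show k = (U.set i p).length from by simp [hU]]
          rw [set_at_middle]
          simp
        · constructor
          · simp only [PySem.List.pyGetD_natCast, List.nil_append]
            rw [List.getD_append _ _ _ _ hi]; exact hir.symm
          · simp only [PySem.List.pyGetD_natCast, List.nil_append, List.cons_append]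
            rw [← hU, getD_at_middle]
      rw [hstep]
      have hb : ((k + ([] ++ s :: V2).length : Nat) : Int) = (((k+1) + V2.length : Nat) : Int) := by
        simp only [List.nil_append, List.length_cons]; push_cast; omega
      have hk1 : (k : Int) + 1 = ((k+1 : Nat) : Int) := by push_cast; omega
      rw [hb, hk1]
      by_cases hpr : p = r
      · rw [walk_nos p q r s i V2 (U.set i p ++ [q]) T (k+1) 1
          (by simp [hU]) (by omega)
          (by rw [List.getD_append _ _ _ _ (by simpa using hi), getD_set_self U i hi, hpr])
          hs2]
        simp
      · rw [walk_noop p q r s i V2 (U.set i p ++ [q]) T (k+1) 1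
          (by simp [hU]) (by omega)
          (by rw [List.getD_append _ _ _ _ (by simpa using hi), getD_set_self U i hi]
              exact hpr)]
        simp
  | cons y V1 ih =>
      intro U T V2 k pt hU hik hir hs hs2
      have hlt : (k : Int) < ((k + ((y :: V1) ++ s :: V2).length : Nat) : Int) := by
        simp only [List.cons_append, List.length_cons]; push_cast; omega
      rw [PySem.List.pyRange_one_cons hlt, List.foldl_cons]
      have hsy : s ≠ y := fun h => hs (by simp [h])
      have hstep : aStep1 p q r s (i : Int) (pt, U ++ (((y :: V1) ++ s :: V2) ++ T)) (k : Int)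
          = (pt, U ++ (((y :: V1) ++ s :: V2) ++ T)) := by
        unfold aStep1
        rw [if_neg]
        simp only [PySem.List.pyGetD_natCast, List.cons_append, List.append_assoc]
        rw [← hU, getD_at_middle]
        tauto
      rw [hstep]
      have hb : ((k + ((y :: V1) ++ s :: V2).length : Nat) : Int)
          = (((k+1) + (V1 ++ s :: V2).length : Nat) : Int) := by
        simp only [List.cons_append, List.length_cons, List.length_append]; push_cast; omega
      have hk1 : (k : Int) + 1 = ((k+1 : Nat) : Int) := by push_cast; omega
      have hre : U ++ (((y :: V1) ++ s :: V2) ++ T) = (U ++ [y]) ++ ((V1 ++ s :: V2) ++ T) := by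
        simp
      rw [hre, hb, hk1, ih (U ++ [y]) T V2 (k+1) pt (by simp [hU]) (by omega)
        (by rw [List.getD_append _ _ _ _ (by omega)]; exact hir)
        (fun h => hs (by simp [h])) hs2]
      have hset : (U ++ [y]).set i p = U.set i p ++ [y] := set_append_left' _ _ _ (by omega) p
      rw [hset]
      simp
lemma foldl_zero_mark {α : Type} (l : List α) (P : α → Prop) [DecidablePred P] :
    ∀ pt : Int, l.foldl (fun pt j => if P j then 0 else pt) pt
      = if ∃ j ∈ l, P j then 0 else pt := by
  induction l with
  | nil => intro pt; simp
  | cons x l ih =>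
      intro pt
      rw [List.foldl_cons, ih]
      by_cases hx : P x
      · simp [hx]
      · simp only [hx, if_false, List.mem_cons]
        by_cases he : ∃ j ∈ l, P j
        · rw [if_pos he, if_pos]
          obtain ⟨j, hj, hPj⟩ := he
          exact ⟨j, List.mem_cons_of_mem _ hj, hPj⟩
        · rw [if_neg he, if_neg]
          rintro ⟨j, hj, hPj⟩
          rcases List.mem_cons.mp hj with hj' | hj'
          · exact hx (hj' ▸ hPj)
          · exact he ⟨j, hj', hPj⟩

def dupDec (N : Int) (c : List Int) : Decidable (∃ i ∈ PySem.List.pyRange 0 (N - 1),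
    ∃ j ∈ PySem.List.pyRange (i + 1) N,
    PySem.List.pyGetD c i 0 = PySem.List.pyGetD c j 0) :=
  @List.decidableBEx Int
    (fun i => ∃ j ∈ PySem.List.pyRange (i + 1) N,
      PySem.List.pyGetD c i 0 = PySem.List.pyGetD c j 0)
    (fun _ => List.decidableBEx _ _) (PySem.List.pyRange 0 (N - 1))

lemma aLoop2_char (N : Int) (c : List Int) (pt : Int) :
    (PySem.List.pyRange 0 (N - 1)).foldl
      (fun pt i => (PySem.List.pyRange (i + 1) N).foldl
        (fun pt j => if PySem.List.pyGetD c i 0 = PySem.List.pyGetD c j 0 then 0 else pt) pt) pt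
    = @ite Int (∃ i ∈ PySem.List.pyRange 0 (N - 1), ∃ j ∈ PySem.List.pyRange (i + 1) N,
        PySem.List.pyGetD c i 0 = PySem.List.pyGetD c j 0)
        (dupDec N c) 0 pt := by
  have hfun : (fun (pt : Int) i => (PySem.List.pyRange (i + 1) N).foldl
        (fun pt j => if PySem.List.pyGetD c i 0 = PySem.List.pyGetD c j 0 then 0 else pt) pt)
      = (fun (pt : Int) i => @ite Int (∃ j ∈ PySem.List.pyRange (i + 1) N,
          PySem.List.pyGetD c i 0 = PySem.List.pyGetD c j 0)
          (List.decidableBEx _ _) 0 pt) := by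
    funext pt i
    exact foldl_zero_mark (PySem.List.pyRange (i + 1) N)
      (fun j => PySem.List.pyGetD c i 0 = PySem.List.pyGetD c j 0) pt
  rw [hfun]
  exact foldl_zero_mark _ _ pt

lemma dup_iff (n : Nat) (hd tl : List Int) (hlen : hd.length = n) :
    (∃ i ∈ PySem.List.pyRange 0 ((n:Int) - 1), ∃ j ∈ PySem.List.pyRange (i + 1) (n:Int),
      PySem.List.pyGetD (hd ++ tl) i 0 = PySem.List.pyGetD (hd ++ tl) j 0)
    ↔ ¬ hd.Nodup := by
  constructor
  · rintro ⟨i, hi, j, hj, heq⟩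
    rw [PySem.List.mem_pyRange_one] at hi hj
    intro hnd
    rw [List.Nodup, List.pairwise_iff_getElem] at hnd
    have hi0 : 0 ≤ i := hi.1
    have hij : i < j := by omega
    have hjn : j < (n : Int) := hj.2
    have hilt : i.toNat < n := by omega
    have hjlt : j.toNat < n := by omega
    have e1 : PySem.List.pyGetD (hd ++ tl) i 0 = hd[i.toNat]'(by omega) := by
      rw [PySem.List.pyGetD_eq_getElem _ _ hi0 (by simp [pysem]; omega)]
      exact List.getElem_append_left (by omega)
    have e2 : PySem.List.pyGetD (hd ++ tl) j 0 = hd[j.toNat]'(by omega) := by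
      rw [PySem.List.pyGetD_eq_getElem _ _ (by omega) (by simp [pysem]; omega)]
      exact List.getElem_append_left (by omega)
    exact hnd i.toNat j.toNat (by omega) (by omega) (by omega) (by rw [← e1, ← e2, heq])
  · intro hnd
    rw [List.Nodup, List.pairwise_iff_getElem] at hnd
    push_neg at hnd
    obtain ⟨i, j, hi, hj, hij, heq⟩ := hnd
    refine ⟨(i : Int), ?_, (j : Int), ?_, ?_⟩
    · rw [PySem.List.mem_pyRange_one]; push_cast; omega
    · rw [PySem.List.mem_pyRange_one]; push_cast; omega
    · have e1 : PySem.List.pyGetD (hd ++ tl) (i:Int) 0 = hd[i] := by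
        rw [PySem.List.pyGetD_eq_getElem _ _ (by positivity) (by simp [pysem]; push_cast; omega)]
        simp only [Int.toNat_natCast]
        exact List.getElem_append_left (by omega)
      have e2 : PySem.List.pyGetD (hd ++ tl) (j:Int) 0 = hd[j] := by
        rw [PySem.List.pyGetD_eq_getElem _ _ (by positivity) (by simp [pysem]; push_cast; omega)]
        simp only [Int.toNat_natCast]
        exact List.getElem_append_left (by omega)
      rw [e1, e2, heq]

lemma ofList_sublist (xs : List Int) : (PySem.Set.ofList xs).Sublist xs := by
  have aux : ∀ (ys : List Int) (acc : List Int), ∃ t, ys.foldl PySem.Set.add acc = acc ++ t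
      ∧ t.Sublist ys := by
    intro ys
    induction ys with
    | nil => intro acc; exact ⟨[], by simp, List.Sublist.refl _⟩
    | cons y ys ih =>
        intro acc
        rw [List.foldl_cons, PySem.Set.add_eq_ite]
        by_cases hy : y ∈ acc
        · obtain ⟨t, ht, hs⟩ := ih acc
          exact ⟨t, by rw [if_pos hy]; exact ht, hs.cons _⟩
        · obtain ⟨t, ht, hs⟩ := ih (acc ++ [y])
          refine ⟨y :: t, ?_, hs.cons₂ _⟩
          rw [if_neg hy, ht]; simp
  obtain ⟨t, ht, hs⟩ := aux xs []
  rw [PySem.Set.ofList_eq_foldl, ht]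
  simpa using hs

lemma setlen_iff (xs : List Int) :
    PySem.Set.len (PySem.Set.ofList xs) = PySem.List.len xs ↔ xs.Nodup := by
  constructor
  · intro h
    have hsub := ofList_sublist xs
    have hlen : (PySem.Set.ofList xs).length = xs.length := by
      have h1 : PySem.Set.len (PySem.Set.ofList xs) = ((PySem.Set.ofList xs).length : Int) := by
        simp [pysem]
      have h2 : PySem.List.len xs = (xs.length : Int) := by simp [pysem]
      rw [h1, h2] at h
      exact_mod_cast h
    have := hsub.eq_of_length hlen
    rw [← this]
    exact PySem.Set.nodup_ofList xs
  · intro h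
    rw [PySem.Set.ofList_eq_self_of_nodup xs h]
    rfl

lemma sortPass (i : Nat) (pre tlZ : List Int) (hpre : pre.length = i) :
    ∀ (rem mid : List Int) (v : Int) (num : Int),
    (∀ x ∈ mid, v ≤ x) → (v :: (mid ++ rem)).Nodup →
    ∃ num' w mid',
      ((PySem.List.pyRange ((i + 1 + mid.length : Nat) : Int)
          ((i + 1 + mid.length + rem.length : Nat) : Int)).foldl (aSortStep (i:Int))
        (num, pre ++ v :: (mid ++ (rem ++ tlZ)))
      = (num', pre ++ w :: (mid' ++ tlZ)))
      ∧ (w :: mid').Perm (v :: (mid ++ rem))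
      ∧ (∀ x ∈ mid', w ≤ x)
      ∧ (num' + (invCount (pre ++ w :: (mid' ++ tlZ)) : Int)) % 2
          = (num + (invCount (pre ++ v :: (mid ++ (rem ++ tlZ))) : Int)) % 2
      ∧ num ≤ num' := by
  intro rem
  induction rem with
  | nil =>
      intro mid v num hmin hnd
      refine ⟨num, v, mid, ?_, by simp, hmin, by simp, le_refl _⟩
      rw [show ((i + 1 + mid.length + [].length : Nat) : Int)
        = ((i + 1 + mid.length : Nat) : Int) from by simp]
      rw [PySem.List.pyRange_one_eq_nil (le_refl _)]
      simp
  | cons y rem' ih =>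
      intro mid v num hmin hnd
      have hlt : ((i + 1 + mid.length : Nat) : Int)
          < ((i + 1 + mid.length + (y :: rem').length : Nat) : Int) := by
        simp only [List.length_cons]; push_cast; omega
      rw [PySem.List.pyRange_one_cons hlt, List.foldl_cons]
      have hki : (i + 1 + mid.length : Nat) = (pre ++ v :: mid).length := by
        simp [hpre]; omega
      have hgi : PySem.List.pyGetD (pre ++ v :: (mid ++ (y :: rem' ++ tlZ))) ((i:Nat):Int) 0
          = v := by
        rw [PySem.List.pyGetD_natCast, ← hpre, getD_at_middle]
      have hgk : PySem.List.pyGetD (pre ++ v :: (mid ++ (y :: rem' ++ tlZ)))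
          (((i + 1 + mid.length : Nat)) : Int) 0 = y := by
        rw [PySem.List.pyGetD_natCast, hki]
        rw [show pre ++ v :: (mid ++ (y :: rem' ++ tlZ))
          = (pre ++ v :: mid) ++ y :: (rem' ++ tlZ) from by simp]
        exact getD_at_middle _ y _
      by_cases hcmp : y < v
      · have hstep : aSortStep (i:Int) (num, pre ++ v :: (mid ++ (y :: rem' ++ tlZ)))
            ((i + 1 + mid.length : Nat) : Int)
            = (num + 1, pre ++ y :: ((mid ++ [v]) ++ (rem' ++ tlZ))) := by
          unfold aSortStep
          rw [if_pos (by rw [hgi, hgk]; exact hcmp)]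
          rw [hgi, hgk]
          congr 1
          rw [PySem.List.pySetD_natCast, PySem.List.pySetD_natCast, hki, ← hpre,
            set_at_middle]
          rw [show pre ++ y :: (mid ++ (y :: rem' ++ tlZ))
            = (pre ++ y :: mid) ++ y :: (rem' ++ tlZ) from by simp]
          rw [show (pre ++ v :: mid).length = (pre ++ y :: mid).length from by simp]
          rw [set_at_middle]
          simp
        rw [hstep]
        have hvmid : v ∉ mid := fun h => (List.nodup_cons.mp hnd).1 (by simp [h])
        have h2 := (List.nodup_cons.mp hnd).2
        have hymid : y ∉ mid := by
          intro hy
          exact (List.nodup_cons.mp ((List.perm_middle.nodup_iff).mp h2)).1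
            (List.mem_append_left _ hy)
        have hperm : (y :: ((mid ++ [v]) ++ rem')).Perm (v :: (mid ++ y :: rem')) := by
          have e1 : (mid ++ [v]) ++ rem' = mid ++ v :: rem' := by simp
          rw [e1]
          exact ((List.perm_middle).cons y).trans ((List.Perm.swap v y _).trans
            (((List.perm_middle).symm).cons v))
        have hnd' : (y :: ((mid ++ [v]) ++ rem')).Nodup := (hperm.nodup_iff).mpr hnd
        have hmin' : ∀ x ∈ mid ++ [v], y ≤ x := by
          intro x hx
          rcases List.mem_append.mp hx with hx | hx
          · exact le_of_lt (lt_of_lt_of_le hcmp (hmin x hx))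
          · simp at hx; subst hx; exact le_of_lt hcmp
        have hidx1 : ((i + 1 + mid.length : Nat) : Int) + 1
            = ((i + 1 + (mid ++ [v]).length : Nat) : Int) := by
          simp; push_cast; ring
        have hidx2 : ((i + 1 + mid.length + (y :: rem').length : Nat) : Int)
            = ((i + 1 + (mid ++ [v]).length + rem'.length : Nat) : Int) := by
          simp; push_cast; ring
        rw [hidx1, hidx2]
        obtain ⟨num', w, mid', hfold, hperm2, hw, hpar, hle⟩ := ih (mid ++ [v]) y (num + 1)
          hmin' hnd'
        refine ⟨num', w, mid', hfold, hperm2.trans hperm, hw, ?_, by omega⟩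
        have hswap := swap_parity pre mid (rem' ++ tlZ) v y hvmid hymid hcmp
        have e2 : pre ++ y :: ((mid ++ [v]) ++ (rem' ++ tlZ))
            = pre ++ y :: (mid ++ v :: (rem' ++ tlZ)) := by simp
        have e3 : pre ++ v :: (mid ++ (y :: rem' ++ tlZ))
            = pre ++ v :: (mid ++ y :: (rem' ++ tlZ)) := by simp
        rw [e2] at hpar
        rw [e3]
        omega
      · have hstep : aSortStep (i:Int) (num, pre ++ v :: (mid ++ (y :: rem' ++ tlZ)))
            ((i + 1 + mid.length : Nat) : Int)
            = (num, pre ++ v :: (mid ++ (y :: rem' ++ tlZ))) := by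
          unfold aSortStep
          rw [if_neg (by rw [hgi, hgk]; exact hcmp)]
        rw [hstep]
        have hmin' : ∀ x ∈ mid ++ [y], v ≤ x := by
          intro x hx
          rcases List.mem_append.mp hx with hx | hx
          · exact hmin x hx
          · simp at hx; subst hx; omega
        have hnd' : (v :: ((mid ++ [y]) ++ rem')).Nodup := by
          have e1 : (mid ++ [y]) ++ rem' = mid ++ y :: rem' := by simp
          rw [e1]; exact hnd
        have hidx1 : ((i + 1 + mid.length : Nat) : Int) + 1
            = ((i + 1 + (mid ++ [y]).length : Nat) : Int) := by
          simp; push_cast; ring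
        have hidx2 : ((i + 1 + mid.length + (y :: rem').length : Nat) : Int)
            = ((i + 1 + (mid ++ [y]).length + rem'.length : Nat) : Int) := by
          simp; push_cast; ring
        have e2 : pre ++ v :: (mid ++ (y :: rem' ++ tlZ))
            = pre ++ v :: ((mid ++ [y]) ++ (rem' ++ tlZ)) := by simp
        rw [hidx1, hidx2, e2]
        obtain ⟨num', w, mid', hfold, hperm2, hw, hpar, hle⟩ := ih (mid ++ [y]) v num
          hmin' hnd'
        refine ⟨num', w, mid', hfold, ?_, hw, hpar, hle⟩
        have e1 : (mid ++ [y]) ++ rem' = mid ++ y :: rem' := by simp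
        rw [e1] at hperm2
        exact hperm2

lemma sortOuter (n : Nat) (tlZ hd0 : List Int) :
    ∀ (d t : Nat) (pre suf : List Int) (num : Int), t + d = n → pre.length = t →
    (pre ++ suf).Perm hd0 → (pre ++ suf).length = n →
    pre.Pairwise (· ≤ ·) → (∀ x ∈ pre, ∀ y ∈ suf, x ≤ y) → hd0.Nodup →
    ∃ num' hd', ((PySem.List.pyRange (t:Int) ((n:Int) - 1)).foldl
        (fun st i => (PySem.List.pyRange (i+1) (n:Int)).foldl (aSortStep i) st)
        (num, pre ++ (suf ++ tlZ))
      = (num', hd' ++ tlZ)) ∧ hd'.Perm hd0 ∧ hd'.Pairwise (· ≤ ·)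
      ∧ (num' + (invCount (hd' ++ tlZ) : Int)) % 2
          = (num + (invCount (pre ++ (suf ++ tlZ)) : Int)) % 2
      ∧ num ≤ num' := by
  intro d
  induction d with
  | zero =>
      intro t pre suf num ht hpre hperm hlen hsort hdom hnd
      have hsuf : suf = [] := by
        have : pre.length + suf.length = n := by simpa using hlen
        exact List.eq_nil_of_length_eq_zero (by omega)
      subst hsuf
      refine ⟨num, pre, ?_, by simpa using hperm, hsort, by simp, le_refl _⟩
      rw [PySem.List.pyRange_one_eq_nil (by omega)]
      simp
  | succ d ih =>
      intro t pre suf num ht hpre hperm hlen hsort hdom hnd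
      have htn : t < n := by omega
      by_cases hlast : d = 0
      · subst hlast
        have hsuf1 : suf.length = 1 := by
          have : pre.length + suf.length = n := by simpa using hlen
          omega
        refine ⟨num, pre ++ suf, ?_, hperm, ?_, by simp, le_refl _⟩
        · rw [PySem.List.pyRange_one_eq_nil (by omega)]
          simp
        · rw [List.pairwise_append]
          obtain ⟨x, hx⟩ := List.length_eq_one_iff.mp hsuf1
          subst hx
          exact ⟨hsort, by simp, fun a ha y hy => hdom a ha y hy⟩
      · have hconsA : PySem.List.pyRange (t:Int) ((n:Int) - 1)
            = (t:Int) :: PySem.List.pyRange ((t:Int)+1) ((n:Int) - 1) :=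
          PySem.List.pyRange_one_cons (by push_cast; omega)
        rw [hconsA, List.foldl_cons]
        obtain ⟨v, rem, hvrem⟩ : ∃ v rem, suf = v :: rem := by
          cases suf with
          | nil => exfalso; have : pre.length + ([]:List Int).length = n := by simpa using hlen
                   simp at this; omega
          | cons v rem => exact ⟨v, rem, rfl⟩
        subst hvrem
        have hsufnd : (v :: rem).Nodup := by
          have : (pre ++ v :: rem).Nodup := (hperm.nodup_iff).mpr hnd
          exact (List.nodup_append.mp this).2.1
        have hrem : rem.length = n - (t + 1) := by
          have : pre.length + (v :: rem).length = n := by simpa using hlen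
          simp at this; omega
        have hpass := sortPass t pre tlZ hpre rem [] v num (by simp)
          (by simpa using hsufnd)
        obtain ⟨num1, w, mid', hfold, hperm1, hw, hpar1, hle1⟩ := hpass
        have hidx : ((t:Int) + 1) = ((t + 1 + ([]:List Int).length : Nat) : Int) := by
          simp
        have hbnd : ((n:Int)) = ((t + 1 + ([]:List Int).length + rem.length : Nat) : Int) := by
          simp [hrem]; push_cast; omega
        have hst : pre ++ (v :: rem ++ tlZ) = pre ++ v :: ([] ++ (rem ++ tlZ)) := by simp
        rw [hidx, hbnd, hst, hfold]
        have hwsuf : (w :: mid').Perm (v :: rem) := by simpa using hperm1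
        have hih := ih (t+1) (pre ++ [w]) mid' num1 (by omega) (by simp [hpre])
          (by
            refine List.Perm.trans ?_ hperm
            have : (pre ++ [w]) ++ mid' = pre ++ (w :: mid') := by simp
            rw [this]
            exact (hwsuf.append_left pre))
          (by
            have h1 : ((pre ++ [w]) ++ mid').length = pre.length + (w :: mid').length := by
              simp
            have h2 : (w :: mid').length = (v :: rem).length := hwsuf.length_eq
            simp at h1 h2 ⊢
            omega)
          (by
            rw [List.pairwise_append]
            refine ⟨hsort, by simp, ?_⟩
            intro x hx y hy
            have hyw : y = w := by simpa using hy
            rw [hyw]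
            exact hdom x hx w ((hwsuf.mem_iff).mp List.mem_cons_self))
          (by
            intro x hx y hy
            rcases List.mem_append.mp hx with hx' | hx'
            · exact hdom x hx' y
                ((hwsuf.mem_iff).mp (List.mem_cons_of_mem _ hy))
            · have hxw : x = w := by simpa using hx'
              rw [hxw]
              exact hw y hy)
          hnd
        obtain ⟨num', hd', hfold2, hperm2, hsort2, hpar2, hle2⟩ := hih
        have hst2 : pre ++ w :: (mid' ++ tlZ) = (pre ++ [w]) ++ (mid' ++ tlZ) := by simp
        rw [hst2] at hfold
        refine ⟨num', hd', ?_, hperm2, hsort2, ?_, by omega⟩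
        · rw [show ((t + 1 + ([]:List Int).length : Nat) : Int) = ((t+1 : Nat) : Int) from by
            simp]
          rw [show ((t + 1 + ([]:List Int).length + rem.length : Nat) : Int) = ((n : Nat) : Int)
            from by simp [hrem]; push_cast; omega]
          rw [hst2]
          exact hfold2
        · have e1 : (pre ++ [w]) ++ (mid' ++ tlZ) = pre ++ w :: (mid' ++ tlZ) := by simp
          rw [e1] at hpar2
          omega

lemma invCount_zero_of_pairwise (l : List Int) (h : l.Pairwise (· ≤ ·)) : invCount l = 0 := by
  induction l with
  | nil => rfl
  | cons x xs ih =>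
      obtain ⟨hx, hxs⟩ := List.pairwise_cons.mp h
      show xs.countP (fun y => y < x) + invCount xs = 0
      rw [ih hxs, List.countP_eq_zero.mpr]
      intro y hy
      simpa using not_lt.mpr (hx y hy)

lemma pvNegOnePowCongr (m k : Nat) (h : m % 2 = k % 2) : ((-1:Int))^m = (-1)^k := by
  rcases Nat.even_or_odd m with hm | hm
  · rw [Even.neg_one_pow hm, Even.neg_one_pow (by rw [Nat.even_iff] at *; omega)]
  · rw [Odd.neg_one_pow hm, Odd.neg_one_pow (by rw [Nat.odd_iff] at *; omega)]

lemma invB_aux (hd : List Int) :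
    ∀ (d t : Nat) (acc : Int), t + d = hd.length →
    (PySem.List.pyRange (t:Int) ((hd.length : Nat) : Int)).foldl
      (fun acc i => (PySem.List.pyRange (i + 1) ((hd.length : Nat) : Int)).foldl
        (fun (acc : Int) j =>
          if PySem.List.pyGetD hd j 0 < PySem.List.pyGetD hd i 0 then acc + 1 else acc) acc) acc
    = acc + (invCount (hd.drop t) : Int) := by
  intro d
  induction d with
  | zero =>
      intro t acc ht
      rw [PySem.List.pyRange_one_eq_nil (by omega)]
      rw [show hd.drop t = [] from List.drop_eq_nil_of_le (by omega)]
      simp [invCount]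
  | succ d ih =>
      intro t acc ht
      have htlen : t < hd.length := by omega
      rw [PySem.List.pyRange_one_cons (by exact_mod_cast htlen), List.foldl_cons]
      have hinner : (PySem.List.pyRange ((t:Int) + 1) ((hd.length : Nat) : Int)).foldl
          (fun (acc : Int) j =>
            if PySem.List.pyGetD hd j 0 < PySem.List.pyGetD hd (t:Int) 0 then acc + 1 else acc) acc
          = acc + ((hd.drop (t+1)).countP (fun y => y < hd.getD t 0) : Int) := by
        have h1 := PySem.List.foldl_pyRange_pyGetD' hd 0
          (fun (acc : Int) y =>
            if y < PySem.List.pyGetD hd (t:Int) 0 then acc + 1 else acc) acc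
          (a := (t:Int) + 1) (by positivity)
        rw [h1]
        rw [show ((t:Int) + 1).toNat = t + 1 from by omega]
        rw [PySem.List.foldl_ite_add_one]
        rw [PySem.List.pyGetD_natCast]
      rw [hinner]
      rw [show ((t:Int) + 1) = ((t + 1 : Nat) : Int) from by push_cast; ring]
      rw [ih (t+1) _ (by omega)]
      rw [List.drop_eq_getElem_cons htlen]
      show _ = acc + (((hd.drop (t+1)).countP (fun y => y < hd[t]) + invCount (hd.drop (t+1)) : Nat) : Int)
      rw [show hd.getD t 0 = hd[t] from List.getD_eq_getElem hd 0 htlen]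
      push_cast
      ring

lemma bandp_small (p q r s N : Int) (a : List Int) (hN : N ≤ 1) :
    bandp p q r s N a = (0, a) := by
  unfold bandp aLoop1 aLoop2
  rw [PySem.List.pyRange_one_eq_nil (by omega)]
  simp
lemma find_aux (v : Int) (tl : List Int) (n : Nat) :
    ∀ (d t : Nat) (hd : List Int), t + d = n → hd.length = n →
    (PySem.List.pyRange (t:Int) (n:Int)).find?
        (fun k => PySem.List.pyGetD (hd ++ tl) k 0 == v)
      = (PySem.List.index? (hd.drop t) v).map (fun m => ((t + m : Nat) : Int)) := by
  intro d
  induction d with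
  | zero =>
      intro t hd ht hlen
      rw [PySem.List.pyRange_one_eq_nil (by omega)]
      rw [List.drop_eq_nil_of_le (by omega)]
      rw [show PySem.List.index? ([] : List Int) v = none from rfl]
      rfl
  | succ d ih =>
      intro t hd ht hlen
      have htn : t < n := by omega
      rw [PySem.List.pyRange_one_cons (by exact_mod_cast htn)]
      have hget : PySem.List.pyGetD (hd ++ tl) (t:Int) 0 = hd[t]'(by omega) := by
        rw [PySem.List.pyGetD_natCast, List.getD_append _ _ _ _ (by omega)]
        exact List.getD_eq_getElem hd 0 (by omega)
      have hdropc : hd.drop t = hd[t]'(by omega) :: hd.drop (t+1) :=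
        List.drop_eq_getElem_cons (by omega)
      by_cases hv : hd[t]'(by omega) = v
      · rw [List.find?_cons_of_pos (by simp [hget, hv])]
        rw [hdropc, hv, show PySem.List.index? (v :: hd.drop (t+1)) v = some 0 from
          PySem.List.index?_cons_self _ _]
        simp
      · rw [List.find?_cons_of_neg (by simp [hget, hv])]
        rw [show (t:Int) + 1 = ((t+1 : Nat) : Int) from by push_cast; ring]
        rw [ih (t+1) hd (by omega) hlen]
        rw [hdropc, PySem.List.index?_cons_of_ne _ (by exact hv)]
        rw [Option.map_map]
        congr 1
        funext m
        simp only [Function.comp]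
        congr 1
        omega

lemma outer_nofire (p q r s : Int) (tl : List Int) (n : Nat) :
    ∀ (d t : Nat) (pt : Int) (hd : List Int), t + d = n → hd.length = n →
    (∀ (i : Nat) (hi : i < hd.length), t ≤ i → hd[i] = r → s ∉ hd.drop (i+1)) →
    (PySem.List.pyRange (t:Int) ((n:Int) - 1)).foldl
      (fun st i => (PySem.List.pyRange (i+1) (n:Int)).foldl (aStep1 p q r s i) st)
      (pt, hd ++ tl) = (pt, hd ++ tl) := by
  intro d
  induction d with
  | zero =>
      intro t pt hd ht hlen hcond
      rw [PySem.List.pyRange_one_eq_nil (by omega)]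
      simp
  | succ d ih =>
      intro t pt hd ht hlen hcond
      by_cases hend : d = 0
      · subst hend
        rw [PySem.List.pyRange_one_eq_nil (by push_cast; omega)]
        simp
      · have htn : t < n - 1 := by omega
        rw [PySem.List.pyRange_one_cons (by push_cast; omega), List.foldl_cons]
        set U := hd.take (t+1) with hUdef
        set V := hd.drop (t+1) with hVdef
        have hUV : hd = U ++ V := (List.take_append_drop _ _).symm
        have hUlen : U.length = t + 1 := by simp [hUdef]; omega
        have hVlen : V.length = n - (t+1) := by simp [hVdef, hlen]
        have hrange : ((t:Int)+1) = (((t+1) : Nat) : Int) := by push_cast; ring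
        have hbound : (n : Int) = (((t+1) + V.length : Nat) : Int) := by push_cast; omega
        have hgetU : U.getD t 0 = hd[t]'(by omega) := by
          rw [hUdef, List.getD_eq_getElem _ 0 (by simp [hlen]; omega)]
          simp
        have hinner : (PySem.List.pyRange ((t:Int)+1) (n:Int)).foldl (aStep1 p q r s (t:Int))
            (pt, hd ++ tl) = (pt, hd ++ tl) := by
          conv_lhs => rw [hUV, List.append_assoc, hrange, hbound]
          conv_rhs => rw [hUV, List.append_assoc]
          by_cases hr : hd[t]'(by omega) = r
          · exact walk_nos p q r s t V U tl (t+1) pt hUlen (by omega)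
              (by rw [hgetU, hr]) (hcond t (by omega) (by omega) hr)
          · exact walk_noop p q r s t V U tl (t+1) pt hUlen (by omega)
              (by rw [hgetU]; exact hr)
        rw [hinner]
        rw [hrange]
        exact ih (t+1) pt hd (by omega) hlen
          (fun i hi hti => hcond i hi (by omega))

lemma outer_skip (p q r s : Int) (tl : List Int) (n ir : Nat) (hirn : ir ≤ n) :
    ∀ (d t : Nat) (pt : Int) (hd : List Int), t + d = ir → hd.length = n →
    (∀ (i : Nat) (hi : i < hd.length), t ≤ i → i < ir → hd[i] ≠ r) →
    (PySem.List.pyRange (t:Int) ((n:Int) - 1)).foldl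
      (fun st i => (PySem.List.pyRange (i+1) (n:Int)).foldl (aStep1 p q r s i) st)
      (pt, hd ++ tl)
    = (PySem.List.pyRange (ir:Int) ((n:Int) - 1)).foldl
      (fun st i => (PySem.List.pyRange (i+1) (n:Int)).foldl (aStep1 p q r s i) st)
      (pt, hd ++ tl) := by
  intro d
  induction d with
  | zero =>
      intro t pt hd ht hlen hcond
      rw [show t = ir from by omega]
  | succ d ih =>
      intro t pt hd ht hlen hcond
      have htir : t < ir := by omega
      by_cases hend : (n:Int) - 1 ≤ (t:Int)
      · rw [PySem.List.pyRange_one_eq_nil hend,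
          PySem.List.pyRange_one_eq_nil (by push_cast at hend ⊢; omega)]
      · rw [PySem.List.pyRange_one_cons (by omega), List.foldl_cons]
        set U := hd.take (t+1) with hUdef
        set V := hd.drop (t+1) with hVdef
        have hUV : hd = U ++ V := (List.take_append_drop _ _).symm
        have hUlen : U.length = t + 1 := by simp [hUdef]; omega
        have hrange : ((t:Int)+1) = (((t+1) : Nat) : Int) := by push_cast; ring
        have hbound : (n : Int) = (((t+1) + V.length : Nat) : Int) := by
          have : V.length = n - (t+1) := by simp [hVdef, hlen]
          push_cast; omega
        have hgetU : U.getD t 0 = hd[t]'(by omega) := by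
          rw [hUdef, List.getD_eq_getElem _ 0 (by simp [hlen]; omega)]
          simp
        have hinner : (PySem.List.pyRange ((t:Int)+1) (n:Int)).foldl (aStep1 p q r s (t:Int))
            (pt, hd ++ tl) = (pt, hd ++ tl) := by
          conv_lhs => rw [hUV, List.append_assoc, hrange, hbound]
          conv_rhs => rw [hUV, List.append_assoc]
          exact walk_noop p q r s t V U tl (t+1) pt hUlen (by omega)
            (by rw [hgetU]; exact hcond t (by omega) (by omega) htir)
        rw [hinner, hrange]
        exact ih (t+1) pt hd (by omega) hlen (fun i hi hti => hcond i hi (by omega))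
theorem bandp_main_eq (p q r s N : Int) (a : List Int)
    (hval : N ≤ (a.length : Int)) (hndpre : (a.take N.toNat).Nodup) :
    bandp p q r s N a = bandp_alt p q r s N a := by
  by_cases hN0 : N ≤ 0
  · rw [bandp_small p q r s N a (by omega)]
    unfold bandp_alt
    rw [PySem.List.pyRange_one_eq_nil hN0]
    rfl
  · set n := N.toNat with hndef
    have hN : ((n : Nat) : Int) = N := Int.toNat_of_nonneg (by omega)
    have hnlen : n ≤ a.length := by omega
    set hd := a.take n with hhd
    set tl := a.drop n with htl
    have hlen : hd.length = n := by rw [hhd]; simp; omega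
    have hsplit : a = hd ++ tl := (List.take_append_drop n a).symm
    have hndhd : hd.Nodup := hndpre
    have hfind1 : (PySem.List.pyRange 0 N).find? (fun k => PySem.List.pyGetD a k 0 == r)
        = (PySem.List.index? hd r).map (fun m => ((m : Nat) : Int)) := by
      have h := find_aux r tl n n 0 hd (by omega) hlen
      simp only [Nat.cast_zero, List.drop_zero, Nat.zero_add] at h
      conv_lhs => rw [hsplit, ← hN]
      exact h
    cases hidx : PySem.List.index? hd r with
    | none =>
        have hrhd : r ∉ hd := (PySem.List.index?_eq_none_iff hd r).mp hidx
        have hA1 : aLoop1 p q r s N a = (0, hd ++ tl) := by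
          unfold aLoop1
          conv_lhs => rw [hsplit, ← hN]
          have h := outer_nofire p q r s tl n n 0 0 hd (by omega) hlen
            (fun i hi _ hir => absurd (hir ▸ List.getElem_mem hi) hrhd)
          simp only [Nat.cast_zero] at h
          exact h
        unfold bandp bandp_alt aLoop2
        rw [hfind1, hidx, hA1]
        simp only [Option.map_none]
        rw [aLoop2_char]
        simp only [ite_self]
        rw [if_pos trivial, ← hsplit]
    | some ir =>
        obtain ⟨U0, W, hheadeq, hU0len, hrU0⟩ := (PySem.List.index?_eq_some_iff hd r ir).mp hidx
        have hirW : ir + 1 + W.length = n := by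
          have h := hlen
          rw [hheadeq] at h
          simp at h
          omega
        have hgetir : ∀ (h : ir < hd.length), hd[ir]'h = r := by
          intro h
          have hg : hd.getD ir 0 = r := by
            rw [hheadeq, ← hU0len]
            exact getD_at_middle U0 r W
          rw [← List.getD_eq_getElem hd 0 h]
          exact hg
        have hdropW : hd.drop (ir + 1) = W := by
          rw [hheadeq, show U0 ++ r :: W = (U0 ++ [r]) ++ W from by simp,
            show ir + 1 = (U0 ++ [r]).length from by simp [hU0len], List.drop_left]
        have hfind2 : (PySem.List.pyRange ((ir : Int) + 1) N).find?
              (fun k => PySem.List.pyGetD a k 0 == s)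
            = (PySem.List.index? W s).map (fun m => ((ir + 1 + m : Nat) : Int)) := by
          have h := find_aux s tl n (n - (ir+1)) (ir+1) hd (by omega) hlen
          rw [hdropW] at h
          conv_lhs => rw [hsplit, ← hN,
            show (ir : Int) + 1 = ((ir + 1 : Nat) : Int) from by push_cast; ring]
          exact h
        have huniq : ∀ (i : Nat) (hi : i < hd.length), hd[i] = r → i = ir := by
          intro i hi hir
          have h2 : hd[i]'hi = hd[ir]'(by omega) := by rw [hir, hgetir]
          exact (List.Nodup.getElem_inj_iff hndhd).mp h2
        cases hidx2 : PySem.List.index? W s with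
        | none =>
            have hsW : s ∉ W := (PySem.List.index?_eq_none_iff W s).mp hidx2
            have hA1 : aLoop1 p q r s N a = (0, hd ++ tl) := by
              unfold aLoop1
              conv_lhs => rw [hsplit, ← hN]
              have h := outer_nofire p q r s tl n n 0 0 hd (by omega) hlen
                (fun i hi _ hir => by rw [huniq i hi hir, hdropW]; exact hsW)
              simp only [Nat.cast_zero] at h
              exact h
            unfold bandp bandp_alt aLoop2
            rw [hfind1, hidx]
            simp only [Option.map_some]
            rw [hfind2, hidx2, hA1]
            simp only [Option.map_none]
            rw [aLoop2_char]
            simp only [ite_self]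
            rw [if_pos trivial, ← hsplit]
        | some m =>
            obtain ⟨V1, V2, hWeq, hV1len, hsV1⟩ := (PySem.List.index?_eq_some_iff W s m).mp hidx2
            have hndW : (r :: W).Nodup := by
              rw [hheadeq] at hndhd
              exact (List.nodup_append.mp hndhd).2.1
            have hrW : r ∉ W := (List.nodup_cons.mp hndW).1
            have hWnd : W.Nodup := (List.nodup_cons.mp hndW).2
            have hsV2 : s ∉ V2 := by
              rw [hWeq] at hWnd
              have h := (List.nodup_append.mp hWnd).2.1
              exact (List.nodup_cons.mp h).1
            have hrV1 : r ∉ V1 := fun h => hrW (hWeq ▸ List.mem_append_left _ h)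
            have hrV2 : r ∉ V2 :=
              fun h => hrW (hWeq ▸ List.mem_append_right _ (List.mem_cons_of_mem _ h))
            set hd2 : List Int := U0 ++ p :: (V1 ++ q :: V2) with hhd2
            have hn2 : n = ir + 1 + m + 1 + V2.length := by
              have h := hirW
              rw [hWeq] at h
              simp at h
              omega
            have hlen2 : hd2.length = n := by
              rw [hhd2]
              simp
              omega
            have hmn : ir + 1 + m < n := by omega
            have hcond2 : ∀ (i : Nat) (hi : i < hd2.length), ir + 1 ≤ i → hd2[i] = r →
                s ∉ hd2.drop (i+1) := by
              intro i hi hge hir2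
              have hPlen : (U0 ++ p :: V1).length = ir + 1 + m := by simp [hU0len, hV1len]; omega
              have hre : hd2 = (U0 ++ p :: V1) ++ q :: V2 := by rw [hhd2]; simp
              have hi' : i < n := hlen2 ▸ hi
              have hg : ((U0 ++ p :: V1) ++ q :: V2).getD i 0 = r := by
                rw [← hre, List.getD_eq_getElem _ 0 hi]
                exact hir2
              by_cases hiq : i = ir + 1 + m
              · rw [show hd2.drop (i+1) = V2 from (by
                    rw [hre,
                      show (U0 ++ p :: V1) ++ q :: V2 = ((U0 ++ p :: V1) ++ [q]) ++ V2 from by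
                        simp,
                      show i + 1 = ((U0 ++ p :: V1) ++ [q]).length from (by
                        simp [hU0len, hV1len]; omega),
                      List.drop_left])]
                exact hsV2
              · exfalso
                by_cases hlt : i < ir + 1 + m
                · have h1 : (U0 ++ p :: V1).getD i 0 = r := by
                    rw [List.getD_append _ _ _ _ (by omega)] at hg
                    exact hg
                  have h2 : V1.getD (i - (ir + 1)) 0 = r := by
                    rw [show U0 ++ p :: V1 = (U0 ++ [p]) ++ V1 from by simp,
                      List.getD_append_right _ _ _ _ (by simp [hU0len]; omega)] at h1
                    rw [show i - (ir + 1) = i - (U0 ++ [p]).length from (by simp [hU0len])]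
                    exact h1
                  have hk : i - (ir + 1) < V1.length := by omega
                  exact hrV1 (by
                    rw [← h2, List.getD_eq_getElem _ 0 hk]
                    exact List.getElem_mem _)
                · have h2 : V2.getD (i - (ir + 1 + m) - 1) 0 = r := by
                    rw [List.getD_append_right _ _ _ _ (by omega)] at hg
                    obtain ⟨k, hk⟩ : ∃ k, i - (U0 ++ p :: V1).length = k + 1 :=
                      ⟨i - (ir + 1 + m) - 1, by rw [hPlen]; omega⟩
                    rw [hk, List.getD_cons_succ] at hg
                    rw [show i - (ir + 1 + m) - 1 = k from (by rw [hPlen] at hk; omega)]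
                    exact hg
                  have hk2 : i - (ir + 1 + m) - 1 < V2.length := by omega
                  exact hrV2 (by
                    rw [← h2, List.getD_eq_getElem _ 0 hk2]
                    exact List.getElem_mem _)
            have hA1 : aLoop1 p q r s N a = (1, hd2 ++ tl) := by
              unfold aLoop1
              conv_lhs => rw [hsplit, ← hN]
              have hskip := outer_skip p q r s tl n ir (by omega) ir 0 0 hd (by omega) hlen
                (fun i hi _ hiir hir => by
                  have h := huniq i hi hir
                  omega)
              simp only [Nat.cast_zero] at hskip
              rw [hskip]
              rw [PySem.List.pyRange_one_cons (by omega), List.foldl_cons]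
              have hfire : (PySem.List.pyRange ((ir:Int) + 1) (n:Int)).foldl
                  (aStep1 p q r s (ir:Int)) (0, hd ++ tl) = (1, hd2 ++ tl) := by
                have hU : (U0 ++ [r]).length = ir + 1 := by simp [hU0len]
                have e1 : hd ++ tl = (U0 ++ [r]) ++ ((V1 ++ s :: V2) ++ tl) := by
                  rw [hheadeq, hWeq]; simp
                have e2 : ((ir:Int) + 1) = ((ir + 1 : Nat) : Int) := by push_cast; ring
                have e3 : (n : Int) = (((ir + 1) + (V1 ++ s :: V2).length : Nat) : Int) := by
                  have h := hirW
                  rw [hWeq] at h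
                  push_cast
                  omega
                conv_lhs => rw [e1, e2, e3]
                rw [walk_find2 p q r s ir V1 (U0 ++ [r]) tl V2 (ir+1) 0 hU (by omega)
                  (by rw [show ir = U0.length from hU0len.symm]; exact getD_at_middle U0 r [])
                  hsV1 hsV2]
                rw [show (U0 ++ [r]).set ir p = U0 ++ [p] from by
                  rw [show ir = U0.length from hU0len.symm]; exact set_at_middle U0 r p []]
                rw [hhd2]; simp
              rw [hfire]
              have hnof := outer_nofire p q r s tl n (n - (ir+1)) (ir+1) 1 hd2 (by omega)
                hlen2 (fun i hi hge => hcond2 i hi hge)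
              rw [show ((ir:Int) + 1) = ((ir + 1 : Nat) : Int) from by push_cast; ring, hnof]
            have hc2 : PySem.List.pySetD (PySem.List.pySetD a ((ir : Nat) : Int) p)
                ((ir + 1 + m : Nat) : Int) q = hd2 ++ tl := by
              rw [PySem.List.pySetD_natCast, PySem.List.pySetD_natCast]
              rw [hsplit, hheadeq, hWeq]
              rw [show U0 ++ r :: (V1 ++ s :: V2) ++ tl
                  = U0 ++ r :: (V1 ++ s :: (V2 ++ tl)) from by simp]
              rw [show ir = U0.length from hU0len.symm, set_at_middle]
              rw [show U0 ++ p :: (V1 ++ s :: (V2 ++ tl))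
                  = (U0 ++ p :: V1) ++ s :: (V2 ++ tl) from by simp]
              rw [show U0.length + 1 + m = (U0 ++ p :: V1).length from (by
                simp [hV1len]; omega)]
              rw [set_at_middle]
              rw [hhd2]; simp
            unfold bandp bandp_alt aLoop2
            rw [hfind1, hidx]
            simp only [Option.map_some]
            rw [hfind2, hidx2]
            simp only [Option.map_some]
            rw [hA1, hc2]
            dsimp only []
            have hslice1 : PySem.List.slice (hd2 ++ tl) none (some N) = hd2 := by
              rw [PySem.List.slice_to _ (by omega), show N.toNat = n from rfl, ← hlen2,
                List.take_left]
            have hslice2 : PySem.List.slice (hd2 ++ tl) (some N) none = tl := by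
              rw [PySem.List.slice_from _ (by omega), show N.toNat = n from rfl, ← hlen2,
                List.drop_left]
            rw [hslice1, hslice2]
            conv_lhs => rw [← hN]
            rw [aLoop2_char]
            by_cases hdup : hd2.Nodup
            · have hnodup' : ¬(∃ i ∈ PySem.List.pyRange 0 ((n:Int) - 1),
                  ∃ j ∈ PySem.List.pyRange (i + 1) (n:Int),
                  PySem.List.pyGetD (hd2 ++ tl) i 0 = PySem.List.pyGetD (hd2 ++ tl) j 0) :=
                fun h => absurd hdup ((dup_iff n hd2 tl hlen2).mp h)
              rw [if_neg hnodup']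
              rw [if_neg (show ¬(1:Int) = 0 from by norm_num)]
              rw [if_neg (not_not_intro ((setlen_iff hd2).mpr hdup))]
              unfold sortA
              have hso := sortOuter n tl hd2 n 0 [] hd2 0 (by omega) rfl (by simp)
                (by simp [hlen2]) (by simp) (by simp) hdup
              obtain ⟨num', hd', hfold, hperm, hsort', hpar, hnum0⟩ := hso
              simp only [Nat.cast_zero, List.nil_append] at hfold hpar
              rw [hfold]
              show ((-1:Int) ^ num'.toNat, hd' ++ tl) = _
              have hinvB : (PySem.List.pyRange 0 N).foldl
                  (fun acc x => (PySem.List.pyRange (x + 1) N).foldl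
                    (fun (acc : Int) y =>
                      if PySem.List.pyGetD hd2 x 0 > PySem.List.pyGetD hd2 y 0 then acc + 1
                      else acc) acc) 0
                  = (invCount hd2 : Int) := by
                simp only [gt_iff_lt]
                conv_lhs => rw [← hN, ← hlen2]
                have h := invB_aux hd2 hd2.length 0 0 (by omega)
                simp only [Nat.cast_zero, List.drop_zero, zero_add] at h
                rw [h]
              rw [hinvB]
              have hnd' : hd'.Nodup := (hperm.nodup_iff).mpr hdup
              have hlt : hd'.Pairwise (· < ·) :=
                (hsort'.and hnd').imp (fun h => lt_of_le_of_ne h.1 h.2)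
              have hsorted : PySem.List.sorted hd2 (fun x => x) = hd' :=
                PySem.List.sorted_eq_of_perm_of_pairwise_lt hd2 hd' (fun x => x) hperm hlt
              rw [hsorted]
              have e1 := invCount_append hd' tl
              have e2 := invCount_append hd2 tl
              have e3 : invCount hd' = 0 := invCount_zero_of_pairwise hd' hsort'
              have e4 : cross hd' tl = cross hd2 tl := cross_perm_left _ _ _ hperm
              have hparN : num'.toNat % 2 = invCount hd2 % 2 := by omega
              rw [show ((invCount hd2 : Int)).toNat = invCount hd2 from by omega]
              rw [pvNegOnePowCongr _ _ hparN]
            · have hdup' : (∃ i ∈ PySem.List.pyRange 0 ((n:Int) - 1),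
                  ∃ j ∈ PySem.List.pyRange (i + 1) (n:Int),
                  PySem.List.pyGetD (hd2 ++ tl) i 0 = PySem.List.pyGetD (hd2 ++ tl) j 0) :=
                (dup_iff n hd2 tl hlen2).mpr hdup
              rw [if_pos hdup']
              rw [if_pos (show (0:Int) = 0 from rfl)]
              rw [if_pos (fun h => hdup ((setlen_iff hd2).mp h))]

-- ===== VERDICT (by name: the statement is the Claim_ definition above) =====
theorem bandp_spec : Claim_equal_bandp := by
  intro p q r s N a _ hpre
  exact bandp_main_eq p q r s N a hpre.1 hpre.2
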